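-- pv_equiv track=rewrite | github.com/jasonuithol/UltimatePyve | utilities/extract_sound.py | scan_sequences
-- ===== SOURCE A (Python) =====
-- def scan_sequences(buf, start=0x2800, end=None, min_pairs=3, max_pairs=64):
--     """Scan for plausible note/duration sequences in the data section."""
--     if end is None:
--         end = len(buf)
--     seqs = []
--     i = start
--     while i < end-2:
--         s = i
--         pairs = []
--         while i+1 < end:
--             n, d = buf[i], buf[i+1]
--             if n in (0x00, 0xFF) or d in (0x00, 0xFF):
--                 break
--             if n > 0x7F or d > 0xF0:  # sanity filter
--                 break
--             pairs.append((n, d))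
--             i += 2
--         if len(pairs) >= min_pairs:
--             seqs.append((s, pairs))
--             i += 1
--         else:
--             i = s+1
--     return seqs
-- ===== SOURCE B (Python) =====
-- def scan_sequences(buf, start=0x2800, end=None, min_pairs=3, max_pairs=64):
--     """Scan for plausible note/duration sequences: backward run-length table, then table-driven forward pass."""
--     e = len(buf) if end is None else end
--     L = len(buf)
--
--     def bad(i):
--         if not (-L <= i < L and -L <= i + 1 < L):
--             return True
--         n, d = buf[i], buf[i + 1]
--         return n in (0x00, 0xFF) or d in (0x00, 0xFF) or n > 0x7F or d > 0xF0
--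
--     run2 = {}
--     if start < e - 2:
--         for i in range(e - 2, start - 1, -1):
--             run2[i] = 0 if bad(i) else 1 + run2.get(i + 2, 0)
--     seqs = []
--     i = start
--     while i < e - 2:
--         k = run2[i]
--         if k >= min_pairs:
--             seqs.append((i, [(buf[i + 2 * j], buf[i + 2 * j + 1]) for j in range(k)]))
--             i += 2 * k + 1
--         else:
--             i += 1
--     return seqs
-- ===== Notes on version B (the rewrite author's own statement) =====
-- stated objective: alternative
-- what changed: Replaces A's nested rescanning while-loops with a backward-built run-length table (run2[i] = 0 or 1 + run2.get(i+2,0)) followed by a table-driven forward pass, so the inner scan becomes a single dict lookup; B bounds-checks pair reads, so it stops a run at the buffer edge instead of raising.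
-- outside the precondition, e.g. on scan_sequences([1, 1], 0, 3, 3, 64): A returns [], B returns []
import Mathlib
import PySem

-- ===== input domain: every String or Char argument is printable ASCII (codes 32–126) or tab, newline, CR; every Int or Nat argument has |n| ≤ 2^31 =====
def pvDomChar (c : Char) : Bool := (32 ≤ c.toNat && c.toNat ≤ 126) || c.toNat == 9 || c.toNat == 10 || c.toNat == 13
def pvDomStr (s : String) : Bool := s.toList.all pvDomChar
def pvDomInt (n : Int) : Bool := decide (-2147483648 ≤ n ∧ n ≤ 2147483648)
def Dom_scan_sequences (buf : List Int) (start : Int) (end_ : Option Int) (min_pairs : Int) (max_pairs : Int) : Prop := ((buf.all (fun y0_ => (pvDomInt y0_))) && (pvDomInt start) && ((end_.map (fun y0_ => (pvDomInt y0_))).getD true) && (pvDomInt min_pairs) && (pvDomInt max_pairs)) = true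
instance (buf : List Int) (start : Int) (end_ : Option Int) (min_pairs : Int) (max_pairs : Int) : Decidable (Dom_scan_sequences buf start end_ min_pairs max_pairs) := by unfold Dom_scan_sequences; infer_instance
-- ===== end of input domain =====

-- B replaces A's nested rescanning while-loops by a backward-built run-length table plus a
-- table-driven forward pass (objective: alternative decomposition); B bounds-checks pair reads,
-- so where A raises IndexError it instead ends the run at the buffer edge.
-- Loops are ported with a fuel parameter sized so it never runs out (a totalization guard only).

-- ===== PORT A =====
-- inner 'while i+1 < end' loop of A: collects pairs, returns (pairs, final i)
def pvInnerA (buf : List Int) (e : Int) : Nat → Int → List (Int × Int) → (List (Int × Int)) × Int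
  | 0, i, pairs => (pairs, i)
  | fuel + 1, i, pairs =>
    if i + 1 < e then
      let n := PySem.List.pyGetD buf i 0
      let d := PySem.List.pyGetD buf (i + 1) 0
      if n = 0 ∨ n = 255 ∨ d = 0 ∨ d = 255 then (pairs, i)
      else if n > 127 ∨ d > 240 then (pairs, i)
      else pvInnerA buf e fuel (i + 2) (pairs ++ [(n, d)])
    else (pairs, i)

-- outer 'while i < end-2' loop of A
def pvOuterA (buf : List Int) (e minp : Int) : Nat → Int → List (Int × List (Int × Int)) → List (Int × List (Int × Int))
  | 0, _, seqs => seqs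
  | fuel + 1, i, seqs =>
    if i < e - 2 then
      let r := pvInnerA buf e ((e - i).toNat + 1) i []
      if ((r.1.length : Int)) ≥ minp then
        pvOuterA buf e minp fuel (r.2 + 1) (seqs ++ [(i, r.1)])
      else
        pvOuterA buf e minp fuel (i + 1) seqs
    else seqs

def scan_sequences (buf : List Int) (start : Int) (end_ : Option Int) (min_pairs : Int) (max_pairs : Int) : List (Int × (List (Int × Int))) :=
  let e := end_.getD ((buf.length : Int))
  pvOuterA buf e min_pairs ((e - start).toNat + 1) start []

-- ===== PORT B =====
-- Source B's 'bad(i)': the pair at i is unusable — out of buffer range, or fails the sanity filters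
def pvBadPair (buf : List Int) (i : Int) : Bool :=
  if ¬ (PySem.Raise.InRange buf.length i ∧ PySem.Raise.InRange buf.length (i + 1)) then true
  else
    decide (PySem.List.pyGetD buf i 0 = 0 ∨ PySem.List.pyGetD buf i 0 = 255 ∨
      PySem.List.pyGetD buf (i + 1) 0 = 0 ∨ PySem.List.pyGetD buf (i + 1) 0 = 255 ∨
      PySem.List.pyGetD buf i 0 > 127 ∨ PySem.List.pyGetD buf (i + 1) 0 > 240)

-- the pair list  [(buf[i+2j], buf[i+2j+1]) for j in range(k)]  (indices in range whenever k > 0)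
def pvPairList (buf : List Int) (i : Int) (k : Nat) : List (Int × Int) :=
  (List.range k).map (fun (j : Nat) => (PySem.List.pyGetD buf (i + 2 * (j : Int)) 0, PySem.List.pyGetD buf (i + 2 * (j : Int) + 1) 0))

-- one step of B's backward table-building loop (run2[i] = 0 if bad(i) else 1 + run2.get(i+2, 0))
def pvStepB (buf : List Int) (r2 : PySem.Dict Int Nat) (i : Int) : PySem.Dict Int Nat :=
  if pvBadPair buf i then r2.insert i 0 else r2.insert i (1 + r2.getD (i + 2) 0)

-- B's forward 'while i < e-2' pass driven by the table
def pvLoopB (buf : List Int) (e minp : Int) (r2 : PySem.Dict Int Nat) : Nat → Int → List (Int × List (Int × Int)) → List (Int × List (Int × Int))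
  | 0, _, seqs => seqs
  | fuel + 1, i, seqs =>
    if i < e - 2 then
      let k := r2.getD i 0
      if (k : Int) ≥ minp then
        pvLoopB buf e minp r2 fuel (i + 2 * (k : Int) + 1) (seqs ++ [(i, pvPairList buf i k)])
      else
        pvLoopB buf e minp r2 fuel (i + 1) seqs
    else seqs

def scan_sequences_alt (buf : List Int) (start : Int) (end_ : Option Int) (min_pairs : Int) (max_pairs : Int) : List (Int × (List (Int × Int))) :=
  let e := end_.getD ((buf.length : Int))
  let run2 := if start < e - 2 then
      (PySem.List.pyRange (e - 2) (start - 1) (-1)).foldl (pvStepB buf) PySem.Dict.empty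
    else PySem.Dict.empty
  pvLoopB buf e min_pairs run2 ((e - start).toNat + 1) start []

-- ===== PRECONDITION & SPEC =====
-- Pre_ excludes inputs whose scan window [start, end) reaches outside the buffer: on those A
-- raises IndexError as soon as the scan touches an out-of-range index, and on the remaining ones
-- (an early break stops the scan first) A returns and B returns the same value — B bounds-checks
-- each pair read and treats the buffer edge as the end of a run.
def Pre_scan_sequences (buf : List Int) (start : Int) (end_ : Option Int) (min_pairs : Int) (max_pairs : Int) : Prop :=
  (end_.getD ((buf.length : Int))) - 2 ≤ start ∨
    (-(buf.length : Int) ≤ start ∧ end_.getD ((buf.length : Int)) ≤ (buf.length : Int))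
instance (buf : List Int) (start : Int) (end_ : Option Int) (min_pairs : Int) (max_pairs : Int) : Decidable (Pre_scan_sequences buf start end_ min_pairs max_pairs) := by unfold Pre_scan_sequences; infer_instance

def pvWitness_scan_sequences : List Int × Int × Option Int × Int × Int := ([1, 2, 3, 4, 5, 6, 1, 2], 0, none, 3, 64)

def Spec_scan_sequences (buf : List Int) (start : Int) (end_ : Option Int) (min_pairs : Int) (max_pairs : Int) (out : List (Int × (List (Int × Int)))) : Prop := out = scan_sequences_alt buf start end_ min_pairs max_pairs
instance (buf : List Int) (start : Int) (end_ : Option Int) (min_pairs : Int) (max_pairs : Int) (out : List (Int × (List (Int × Int)))) : Decidable (Spec_scan_sequences buf start end_ min_pairs max_pairs out) := by unfold Spec_scan_sequences; infer_instance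

-- ===== CLAIM (what is proved, stated in full; the proofs are below) =====
def Claim_equal_scan_sequences : Prop := ∀ (buf : List Int) (start : Int) (end_ : Option Int) (min_pairs : Int) (max_pairs : Int), Dom_scan_sequences buf start end_ min_pairs max_pairs → Pre_scan_sequences buf start end_ min_pairs max_pairs → Spec_scan_sequences buf start end_ min_pairs max_pairs (scan_sequences buf start end_ min_pairs max_pairs)


-- ===== LEMMAS AND PROOFS =====

-- reference run length (same fuel discipline as pvInnerA)
def pvRunLen (buf : List Int) (e : Int) : Nat → Int → Nat
  | 0, _ => 0
  | fuel + 1, i =>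
    if i + 1 < e then
      let n := PySem.List.pyGetD buf i 0
      let d := PySem.List.pyGetD buf (i + 1) 0
      if n = 0 ∨ n = 255 ∨ d = 0 ∨ d = 255 ∨ n > 127 ∨ d > 240 then 0
      else pvRunLen buf e fuel (i + 2) + 1
    else 0

-- canonical (fuel-saturated) run length
def pvRL (buf : List Int) (e i : Int) : Nat := pvRunLen buf e ((e - i).toNat + 1) i

-- under Pre_, every in-window index is in range, so B's bad(i) coincides with the value filter on
-- pyGetD-read values (out-of-range reads default to 0, which the filter also rejects)
theorem pvBadPair_iff (buf : List Int) (i : Int) :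
    pvBadPair buf i = true ↔ (PySem.List.pyGetD buf i 0 = 0 ∨ PySem.List.pyGetD buf i 0 = 255 ∨
      PySem.List.pyGetD buf (i + 1) 0 = 0 ∨ PySem.List.pyGetD buf (i + 1) 0 = 255 ∨
      PySem.List.pyGetD buf i 0 > 127 ∨ PySem.List.pyGetD buf (i + 1) 0 > 240) := by
  unfold pvBadPair
  by_cases h : PySem.Raise.InRange buf.length i ∧ PySem.Raise.InRange buf.length (i + 1)
  · simp [h]
  · simp only [h, not_false_iff, if_pos, true_iff]
    rcases not_and_or.mp h with h1 | h1
    · left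
      exact PySem.List.pyGetD_of_none buf i 0 ((PySem.List.pyGet?_eq_none_iff buf i).mpr h1)
    · right; right; left
      exact PySem.List.pyGetD_of_none buf (i + 1) 0 ((PySem.List.pyGet?_eq_none_iff buf (i + 1)).mpr h1)

theorem pvPairList_zero (buf : List Int) (i : Int) : pvPairList buf i 0 = [] := by
  simp [pvPairList]

theorem pvPairList_succ (buf : List Int) (i : Int) (k : Nat) :
    pvPairList buf i (k + 1) =
      (PySem.List.pyGetD buf i 0, PySem.List.pyGetD buf (i + 1) 0) :: pvPairList buf (i + 2) k := by
  rw [pvPairList, List.range_succ_eq_map, List.map_cons, List.map_map, pvPairList]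
  congr 1
  · norm_num
  · apply List.map_congr_left
    intro j _
    simp only [Function.comp_apply]
    push_cast
    ring_nf

theorem pvRunLen_fuel (buf : List Int) (e : Int) : ∀ (f1 f2 : Nat) (i : Int),
    (e - i).toNat < f1 → (e - i).toNat < f2 → pvRunLen buf e f1 i = pvRunLen buf e f2 i := by
  intro f1
  induction f1 with
  | zero => intro f2 i h1 _; omega
  | succ f1 ih =>
    intro f2 i h1 h2
    match f2, h2 with
    | f2 + 1, h2 =>
      rw [pvRunLen, pvRunLen]
      by_cases h : i + 1 < e
      · simp only [h, if_pos]
        by_cases hb : PySem.List.pyGetD buf i 0 = 0 ∨ PySem.List.pyGetD buf i 0 = 255 ∨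
            PySem.List.pyGetD buf (i + 1) 0 = 0 ∨ PySem.List.pyGetD buf (i + 1) 0 = 255 ∨
            PySem.List.pyGetD buf i 0 > 127 ∨ PySem.List.pyGetD buf (i + 1) 0 > 240
        · simp [hb]
        · simp only [if_neg hb]
          rw [ih f2 (i + 2) (by omega) (by omega)]
      · simp [h]

theorem pvRL_bad (buf : List Int) (e i : Int) (h : i + 1 < e)
    (hb : PySem.List.pyGetD buf i 0 = 0 ∨ PySem.List.pyGetD buf i 0 = 255 ∨
      PySem.List.pyGetD buf (i + 1) 0 = 0 ∨ PySem.List.pyGetD buf (i + 1) 0 = 255 ∨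
      PySem.List.pyGetD buf i 0 > 127 ∨ PySem.List.pyGetD buf (i + 1) 0 > 240) :
    pvRL buf e i = 0 := by
  rw [pvRL, pvRunLen]
  simp [h, hb]

theorem pvRL_good (buf : List Int) (e i : Int) (h : i + 1 < e)
    (hb : ¬ (PySem.List.pyGetD buf i 0 = 0 ∨ PySem.List.pyGetD buf i 0 = 255 ∨
      PySem.List.pyGetD buf (i + 1) 0 = 0 ∨ PySem.List.pyGetD buf (i + 1) 0 = 255 ∨
      PySem.List.pyGetD buf i 0 > 127 ∨ PySem.List.pyGetD buf (i + 1) 0 > 240)) :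
    pvRL buf e i = pvRL buf e (i + 2) + 1 := by
  rw [pvRL, pvRunLen]
  simp only [h, if_pos, if_neg hb]
  rw [pvRunLen_fuel buf e ((e - i).toNat) ((e - (i + 2)).toNat + 1) (i + 2) (by omega) (by omega)]
  rfl

theorem pvRL_stop (buf : List Int) (e i : Int) (h : ¬ i + 1 < e) : pvRL buf e i = 0 := by
  rw [pvRL, pvRunLen]
  simp [h]

-- A's inner loop computes exactly pvRunLen (same fuel) pairs and advances i by twice that
theorem pvInnerA_eq (buf : List Int) (e : Int) : ∀ (fuel : Nat) (i : Int) (pairs : List (Int × Int)),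
    pvInnerA buf e fuel i pairs =
      (pairs ++ pvPairList buf i (pvRunLen buf e fuel i), i + 2 * ((pvRunLen buf e fuel i : Int))) := by
  intro fuel
  induction fuel with
  | zero => intro i pairs; rw [pvInnerA, pvRunLen]; simp [pvPairList_zero]
  | succ fuel ih =>
    intro i pairs
    rw [pvInnerA, pvRunLen]
    by_cases h : i + 1 < e
    · by_cases h1 : PySem.List.pyGetD buf i 0 = 0 ∨ PySem.List.pyGetD buf i 0 = 255 ∨
          PySem.List.pyGetD buf (i + 1) 0 = 0 ∨ PySem.List.pyGetD buf (i + 1) 0 = 255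
      · have hbad : (PySem.List.pyGetD buf i 0 = 0 ∨ PySem.List.pyGetD buf i 0 = 255 ∨
            PySem.List.pyGetD buf (i + 1) 0 = 0 ∨ PySem.List.pyGetD buf (i + 1) 0 = 255 ∨
            PySem.List.pyGetD buf i 0 > 127 ∨ PySem.List.pyGetD buf (i + 1) 0 > 240) := by tauto
        simp [h, h1, hbad, pvPairList_zero]
      · by_cases h2 : PySem.List.pyGetD buf i 0 > 127 ∨ PySem.List.pyGetD buf (i + 1) 0 > 240
        · have hbad : (PySem.List.pyGetD buf i 0 = 0 ∨ PySem.List.pyGetD buf i 0 = 255 ∨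
              PySem.List.pyGetD buf (i + 1) 0 = 0 ∨ PySem.List.pyGetD buf (i + 1) 0 = 255 ∨
              PySem.List.pyGetD buf i 0 > 127 ∨ PySem.List.pyGetD buf (i + 1) 0 > 240) := by tauto
          simp [h, h1, h2, pvPairList_zero]
        · have hbad : ¬ (PySem.List.pyGetD buf i 0 = 0 ∨ PySem.List.pyGetD buf i 0 = 255 ∨
              PySem.List.pyGetD buf (i + 1) 0 = 0 ∨ PySem.List.pyGetD buf (i + 1) 0 = 255 ∨
              PySem.List.pyGetD buf i 0 > 127 ∨ PySem.List.pyGetD buf (i + 1) 0 > 240) := by tauto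
          have ih' := ih (i + 2) (pairs ++ [(PySem.List.pyGetD buf i 0, PySem.List.pyGetD buf (i + 1) 0)])
          simp [h, h1, h2, ih', pvPairList_succ, List.append_assoc, Prod.ext_iff]
          omega
    · simp [h, pvPairList_zero]

-- B's backward fold fills the table with exactly the run lengths
theorem pvDict_eq (buf : List Int) (e b : Int) : ∀ (N : Nat) (t : Int) (d : PySem.Dict Int Nat),
    (t - b).toNat ≤ N → t ≤ e - 2 →
    (∀ j, t < j → j ≤ e - 2 → d.getD j 0 = pvRL buf e j) →
    (∀ j, e - 2 < j → d.getD j 0 = 0) →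
    ∀ j, b < j → j ≤ e - 2 →
      ((PySem.List.pyRange t b (-1)).foldl (pvStepB buf) d).getD j 0 = pvRL buf e j := by
  intro N
  induction N with
  | zero =>
    intro t d hN ht h1 h2 j hj1 hj2
    have hle : t ≤ b := by omega
    rw [PySem.List.pyRange_neg_one_eq_nil hle]
    exact h1 j (by omega) hj2
  | succ N ih =>
    intro t d hN ht h1 h2 j hj1 hj2
    by_cases hbt : b < t
    · rw [PySem.List.pyRange_neg_one_cons hbt]
      simp only [List.foldl_cons]
      refine ih (t - 1) (pvStepB buf d t) (by omega) (by omega) ?_ ?_ j hj1 hj2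
      · intro j' hj'1 hj'2
        by_cases hjt : j' = t
        · subst hjt
          have hlt : j' + 1 < e := by omega
          by_cases hb : PySem.List.pyGetD buf j' 0 = 0 ∨ PySem.List.pyGetD buf j' 0 = 255 ∨
              PySem.List.pyGetD buf (j' + 1) 0 = 0 ∨ PySem.List.pyGetD buf (j' + 1) 0 = 255 ∨
              PySem.List.pyGetD buf j' 0 > 127 ∨ PySem.List.pyGetD buf (j' + 1) 0 > 240
          · have hbp : pvBadPair buf j' = true := (pvBadPair_iff buf j').mpr hb
            rw [pvStepB, if_pos hbp, PySem.Dict.getD_insert, if_pos rfl, pvRL_bad buf e j' hlt hb]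
          · have hbp : pvBadPair buf j' = false := by
              rw [← Bool.not_eq_true, pvBadPair_iff]; exact hb
            rw [pvStepB, hbp]
            simp only [Bool.false_eq_true, if_false]
            rw [PySem.Dict.getD_insert, if_pos rfl, pvRL_good buf e j' hlt hb]
            by_cases hin : j' + 2 ≤ e - 2
            · rw [h1 (j' + 2) (by omega) hin]
              omega
            · rw [h2 (j' + 2) (by omega), pvRL_stop buf e (j' + 2) (by omega)]
        · rw [pvStepB]
          by_cases hbp : pvBadPair buf t
          · rw [if_pos hbp, PySem.Dict.getD_insert, if_neg hjt]
            exact h1 j' (by omega) hj'2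
          · rw [if_neg hbp, PySem.Dict.getD_insert, if_neg hjt]
            exact h1 j' (by omega) hj'2
      · intro j' hj'
        have hjt : j' ≠ t := by omega
        rw [pvStepB]
        by_cases hbp : pvBadPair buf t
        · rw [if_pos hbp, PySem.Dict.getD_insert, if_neg hjt]
          exact h2 j' hj'
        · rw [if_neg hbp, PySem.Dict.getD_insert, if_neg hjt]
          exact h2 j' hj'
    · rw [PySem.List.pyRange_neg_one_eq_nil (by omega)]
      exact h1 j (by omega) hj2

-- the two passes agree once the table holds the run lengths
theorem pvLoop_eq (buf : List Int) (e minp lo : Int) (r2 : PySem.Dict Int Nat)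
    (hdict : ∀ j, lo ≤ j → j < e - 2 → r2.getD j 0 = pvRL buf e j) :
    ∀ (fA fB : Nat) (i : Int) (seqs : List (Int × List (Int × Int))),
    lo ≤ i → (e - 2 - i).toNat < fA → (e - 2 - i).toNat < fB →
    pvOuterA buf e minp fA i seqs = pvLoopB buf e minp r2 fB i seqs := by
  intro fA
  induction fA with
  | zero => intro fB i seqs _ hA _; omega
  | succ fA ih =>
    intro fB i seqs hlo hA hB
    match fB, hB with
    | fB + 1, hB =>
      rw [pvOuterA, pvLoopB]
      by_cases h : i < e - 2
      · simp only [h, if_pos]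
        rw [pvInnerA_eq buf e ((e - i).toNat + 1) i []]
        have hk : r2.getD i 0 = pvRL buf e i := hdict i hlo h
        rw [hk]
        simp only [List.nil_append]
        have hRL : pvRunLen buf e ((e - i).toNat + 1) i = pvRL buf e i := rfl
        rw [hRL]
        have hlen : ((pvPairList buf i (pvRL buf e i)).length : Int) = ((pvRL buf e i : Int)) := by
          simp [pvPairList]
        rw [hlen]
        by_cases hge : ((pvRL buf e i : Int)) ≥ minp
        · simp only [if_pos hge]
          rw [ih fB (i + 2 * ((pvRL buf e i : Int)) + 1) _ (by omega) (by omega) (by omega)]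
        · simp only [if_neg hge]
          rw [ih fB (i + 1) _ (by omega) (by omega) (by omega)]
      · simp [h]

-- ===== VERDICT (by name: the statements are the Claim_ definitions above) =====
theorem scan_sequences_spec : Claim_equal_scan_sequences := by
  intro buf start end_ min_pairs max_pairs _hdom _hpre
  unfold Spec_scan_sequences scan_sequences scan_sequences_alt
  set e := end_.getD ((buf.length : Int)) with he
  by_cases hlt : start < e - 2
  · simp only [hlt, if_pos]
    apply pvLoop_eq buf e min_pairs start _ _ ((e - start).toNat + 1) ((e - start).toNat + 1)
      start [] (le_refl _) (by omega) (by omega)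
    intro j hjs hj
    exact pvDict_eq buf e (start - 1) ((e - 2 - (start - 1)).toNat) (e - 2) PySem.Dict.empty
      (le_refl _) (le_refl _)
      (fun j' h1 h2 => absurd h1 (by omega))
      (fun j' h1 => by simp [PySem.Dict.getD_empty])
      j (by omega) (by omega)
  · rw [pvOuterA, pvLoopB]
    simp [hlt]
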